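-- pv_equiv track=rewrite | github.com/equinor/neqsim | devtools/task_template/step3_report/generate_report.py | _strip_yaml_comment
-- ===== SOURCE A (Python) =====
-- def _strip_yaml_comment(line):
--     """Strip YAML comments while preserving hashes inside quoted strings."""
--     result = []
--     quote = None
--     for character in line:
--         if character in ('"', "'"):
--             if quote == character:
--                 quote = None
--             elif quote is None:
--                 quote = character
--         if character == "#" and quote is None:
--             break
--         result.append(character)
--     return "".join(result).rstrip()
-- ===== SOURCE B (Python) =====
-- def _strip_yaml_comment(line):
--     """Strip YAML comments while preserving hashes inside quoted strings."""
--     i = 0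
--     n = len(line)
--     while i < n:
--         c = line[i]
--         if c in '"\'':
--             j = line.find(c, i + 1)
--             i = n if j < 0 else j + 1
--         elif c == '#':
--             return line[:i].rstrip()
--         else:
--             i += 1
--     return line.rstrip()
-- ===== Notes on version B (the rewrite author's own statement) =====
-- stated objective: alternative
-- what changed: Replaces A's per-character quote-state machine (explicit quote flag, appending to a result list) by an index-jumping scan that uses str.find to skip each whole quoted span at once and slices the line at the first unquoted hash character.
import Mathlib
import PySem

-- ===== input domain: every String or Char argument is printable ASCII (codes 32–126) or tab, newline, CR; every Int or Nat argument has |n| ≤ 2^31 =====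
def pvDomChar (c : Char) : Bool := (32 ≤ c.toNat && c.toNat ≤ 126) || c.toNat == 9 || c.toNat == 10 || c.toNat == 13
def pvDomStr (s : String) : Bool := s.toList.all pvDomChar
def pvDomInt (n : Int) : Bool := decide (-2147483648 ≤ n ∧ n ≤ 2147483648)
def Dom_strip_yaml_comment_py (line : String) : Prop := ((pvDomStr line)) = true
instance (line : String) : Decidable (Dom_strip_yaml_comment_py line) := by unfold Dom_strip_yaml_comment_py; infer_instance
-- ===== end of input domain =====

-- B replaces A's per-character quote-state machine by skipping whole quoted spans with a
-- substring search (str.find), so the loop advances a span at a time; alternative, same cost.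

-- ===== PORT A =====
-- per-character scan carrying the current open-quote state; break at an unquoted '#'
def stripALoop : List Char → Option Char → List Char
  | [], _ => []
  | c :: rest, quote =>
    let quote' :=
      if c = '"' ∨ c = '\'' then
        (if quote = some c then none else if quote = none then some c else quote)
      else quote
    if c = '#' ∧ quote' = none then []
    else c :: stripALoop rest quote'

def strip_yaml_comment_py (line : String) : String :=
  PySem.Str.rstrip (String.ofList (stripALoop line.toList none))

-- ===== PORT B =====
-- index-jumping scan: on an opening quote, find the matching close quote and skip the span
def stripBLoop : List Char → List Char
  | [] => []
  | c :: rest =>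
    if c = '"' ∨ c = '\'' then
      match rest.findIdx? (· == c) with
      | none => c :: rest                                   -- unterminated quote: keep to end
      | some j => c :: (rest.take (j + 1) ++ stripBLoop (rest.drop (j + 1)))
    else if c = '#' then []
    else c :: stripBLoop rest
termination_by l => l.length
decreasing_by
  · simp only [List.length_drop, List.length_cons]; omega
  · simp

def strip_yaml_comment_py_alt (line : String) : String :=
  PySem.Str.rstrip (String.ofList (stripBLoop line.toList))

-- ===== PRECONDITION & SPEC =====
def Spec_strip_yaml_comment_py (line : String) (out : String) : Prop := out = strip_yaml_comment_py_alt line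
instance (line : String) (out : String) : Decidable (Spec_strip_yaml_comment_py line out) := by unfold Spec_strip_yaml_comment_py; infer_instance

-- ===== CLAIM (what is proved, stated in full; the proofs are below) =====
def Claim_equal_strip_yaml_comment_py : Prop := ∀ (line : String), Dom_strip_yaml_comment_py line → Spec_strip_yaml_comment_py line (strip_yaml_comment_py line)

-- ===== LEMMAS AND PROOFS =====

-- inside a quote q, A copies every character verbatim until the next q closes the quote
theorem stepA (q d : Char) (hq : q = '"' ∨ q = '\'') (rest : List Char) :
    stripALoop (d :: rest) (some q) =
      d :: stripALoop rest (if d = q then none else some q) := by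
  rcases hq with hq | hq <;> subst hq <;>
    by_cases hd : d = '"' <;> by_cases hd' : d = '\'' <;>
      simp_all [stripALoop]

theorem inQuote (q : Char) (hq : q = '"' ∨ q = '\'') (l : List Char) :
    stripALoop l (some q) =
      match l.findIdx? (· == q) with
      | none => l
      | some j => l.take (j + 1) ++ stripALoop (l.drop (j + 1)) none := by
  induction l with
  | nil => simp [stripALoop]
  | cons d rest ih =>
    rw [stepA q d hq rest]
    by_cases hd : d = q
    · subst hd
      simp [List.findIdx?_cons]
    · rw [if_neg hd]
      rw [List.findIdx?_cons, if_neg (by simpa using hd)]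
      cases h : rest.findIdx? (· == q) with
      | none => simp [h] at ih ⊢; exact ih
      | some j =>
        simp only [h, Option.map_some] at ih ⊢
        simp [ih, List.take_succ_cons, List.drop_succ_cons]

theorem loopAB : ∀ (n : Nat) (l : List Char), l.length ≤ n → stripALoop l none = stripBLoop l := by
  intro n
  induction n with
  | zero =>
    intro l hl
    have : l = [] := List.eq_nil_of_length_eq_zero (Nat.le_zero.mp hl)
    subst this; simp [stripALoop, stripBLoop]
  | succ n ih =>
    intro l hl
    cases l with
    | nil => simp [stripALoop, stripBLoop]
    | cons c rest =>
      by_cases hc : c = '"' ∨ c = '\''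
      · have hA : stripALoop (c :: rest) none = c :: stripALoop rest (some c) := by
          have hc' : c ≠ '#' := by rcases hc with h | h <;> simp [h]
          simp [stripALoop, hc, hc']
        rw [hA, inQuote c hc rest]
        rw [stripBLoop, if_pos hc]
        cases h : rest.findIdx? (· == c) with
        | none => simp
        | some j =>
          have hlen : (rest.drop (j + 1)).length ≤ n := by
            simp only [List.length_drop]
            have := Nat.le_of_succ_le_succ hl
            omega
          simp [ih _ hlen]
      · by_cases hH : c = '#'
        · subst hH
          simp [stripALoop, stripBLoop]
        · have : stripALoop (c :: rest) none = c :: stripALoop rest none := by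
            simp [stripALoop, hc, hH]
          rw [this, stripBLoop, if_neg hc, if_neg hH,
            ih rest (Nat.le_of_succ_le_succ hl)]

-- ===== VERDICT (by name: the statement is the Claim_ definition above) =====
theorem strip_yaml_comment_py_spec : Claim_equal_strip_yaml_comment_py := by
  intro line _
  unfold Spec_strip_yaml_comment_py strip_yaml_comment_py strip_yaml_comment_py_alt
  rw [loopAB line.toList.length line.toList le_rfl]
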